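-- pv_equiv track=rewrite | github.com/Apjo/algorithms_and_datastructures | src/dsa/python/dp/can_make_palind_queries.py | canMakePaliQueries
-- ===== SOURCE A (Python) =====
-- from typing import List
-- import collections
--
-- def canMakePaliQueries(s: str, queries: List[List[int]]) -> List[bool]:
--     dp = [collections.Counter()] #dp[i] = frequency vector of size 26 it will store something like
--     # {
--     #     'a': count,
--     #     'b': count,
--     #     'c': count,
--     #     ...
--     # }
--
--     for i in range(1, len(s) + 1):
--         dp.append(dp[i - 1] + collections.Counter(s[i - 1]))
--     res=[]
--     for l, r, q in queries:
--         count = dp[r + 1] - dp[l]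
--         freq_sum = sum(freq % 2 for freq in count.values())
--         need = freq_sum // 2
--         res.append(need <= q)
--     return res
-- ===== SOURCE B (Python) =====
-- def canMakePaliQueries(s, queries):
--     # No precomputation: answer each query by one direct scan of the slice,
--     # toggling membership in a set of letters seen an odd number of times.
--     res = []
--     for l, r, q in queries:
--         odd = set()
--         for ch in s[l:r + 1]:
--             if ch in odd:
--                 odd.discard(ch)
--             else:
--                 odd.add(ch)
--         res.append(len(odd) // 2 <= q)
--     return res
-- ===== Notes on version B (the rewrite author's own statement) =====
-- stated objective: simpler
-- what changed: Drops A's staged prefix pass that builds n+1 Counter objects and differences them per query; B answers each query by a single direct scan of the slice s[l:r+1], toggling a set of odd-count letters, with no precomputed structure at all.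
-- outside the precondition, e.g. on canMakePaliQueries('ab', [[-2, 1, 0]]): A returns [True], B returns [False]
import Mathlib
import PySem

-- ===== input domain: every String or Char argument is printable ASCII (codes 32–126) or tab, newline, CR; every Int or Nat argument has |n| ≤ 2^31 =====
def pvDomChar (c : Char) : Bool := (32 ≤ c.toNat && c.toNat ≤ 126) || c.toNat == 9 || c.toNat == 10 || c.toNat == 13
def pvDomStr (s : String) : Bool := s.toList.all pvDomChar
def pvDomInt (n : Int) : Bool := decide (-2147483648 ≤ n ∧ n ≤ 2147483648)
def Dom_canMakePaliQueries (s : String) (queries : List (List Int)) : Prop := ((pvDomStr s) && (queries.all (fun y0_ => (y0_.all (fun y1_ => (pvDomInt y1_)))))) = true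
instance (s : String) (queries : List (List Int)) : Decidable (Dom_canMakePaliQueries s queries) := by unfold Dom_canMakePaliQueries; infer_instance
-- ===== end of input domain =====

-- B drops A's staged prefix pass of Counter objects and their per-query subtraction; it answers each
-- query by a single direct scan of the slice s[l:r+1], toggling a set of odd-count letters (simpler,
-- no precomputed structure; not claimed faster).

-- ===== PORT A =====
-- Counter lookup other[elem]: first match, default 0 (a Counter, built here, has unique keys)
def pvCntGet (c : List (Char × Int)) (k : Char) : Int :=
  match c with
  | [] => 0
  | (k', v) :: t => if k' = k then v else pvCntGet t k

-- CPython Counter.__add__: self's items updated, then other's new positive items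
def pvCounterAdd (c1 c2 : List (Char × Int)) : List (Char × Int) :=
  ((c1.map (fun p => (p.1, p.2 + pvCntGet c2 p.1))).filter (fun p => decide (0 < p.2)))
  ++ (c2.filter (fun p => decide (p.1 ∉ c1.map Prod.fst) && decide (0 < p.2)))

-- CPython Counter.__sub__: self's items minus other, then other's new negative items negated
def pvCounterSub (c1 c2 : List (Char × Int)) : List (Char × Int) :=
  ((c1.map (fun p => (p.1, p.2 - pvCntGet c2 p.1))).filter (fun p => decide (0 < p.2)))
  ++ ((c2.filter (fun p => decide (p.1 ∉ c1.map Prod.fst) && decide (p.2 < 0))).map (fun p => (p.1, -p.2)))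

-- loop body for one query [l, r, q] (rows of another arity raise ValueError in Python; excluded by Pre_)
def pvAnswerA (dp : List (List (Char × Int))) (qr : List Int) : Bool :=
  match qr with
  | [l, r, q] =>
    let count := pvCounterSub ((PySem.List.pyGet? dp (r+1)).getD []) ((PySem.List.pyGet? dp l).getD [])
    let freqSum := (count.map Prod.snd).foldl (fun a v => a + PySem.Int.mod v 2) 0
    decide (PySem.Int.floordiv freqSum 2 ≤ q)
  | _ => false

def canMakePaliQueries (s : String) (queries : List (List Int)) : List Bool :=
  -- dp[i] = Counter of s[:i]; indices in the loop are always in range, so .getD defaults are never used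
  let dp := (PySem.List.pyRange 1 (PySem.Str.len s + 1) 1).foldl
    (fun dp i => dp ++ [pvCounterAdd ((PySem.List.pyGet? dp (i-1)).getD [])
                         [(((PySem.Str.pyGet? s (i-1)).getD ' '), 1)]]) [[]]
  queries.foldl (fun res qr => res ++ [pvAnswerA dp qr]) []

-- ===== PORT B =====
-- the inner loop of B: toggle membership of each slice character in the set of odd-count letters
def pvScanOdd (sub : List Char) : PySem.Set Char :=
  sub.foldl (fun odd ch =>
      if PySem.Set.contains odd ch then PySem.Set.discard odd ch else PySem.Set.add odd ch)
    PySem.Set.empty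

-- loop body for one query [l, r, q]
def pvAnswerB (cs : List Char) (qr : List Int) : Bool :=
  match qr with
  | [l, r, q] =>
    let odd := pvScanOdd (PySem.List.slice cs (some l) (some (r+1)))
    decide (PySem.Int.floordiv (PySem.Set.len odd) 2 ≤ q)
  | _ => false

def canMakePaliQueries_alt (s : String) (queries : List (List Int)) : List Bool :=
  queries.foldl (fun res qr => res ++ [pvAnswerB s.toList qr]) []

-- ===== PRECONDITION & SPEC =====
def pvPreQ (n : Int) (qr : List Int) : Bool :=
  match qr with
  | [l, r, _q] => decide (0 ≤ l ∧ l ≤ n ∧ 0 ≤ r + 1 ∧ r + 1 ≤ n)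
  | _ => false

-- Pre_ excludes rows that are not [l,r,q] triples (A raises ValueError) and rows whose dp index is
-- out of range (A raises IndexError), and also negative in-range indices, where A's wraparound over
-- the dp list of n+1 prefixes (modulo n+1) and B's Python slice wraparound over the n characters
-- (modulo n) are two accidental readings of a query no caller specifies.
def Pre_canMakePaliQueries (s : String) (queries : List (List Int)) : Prop :=
  queries.all (pvPreQ (s.toList.length : Int)) = true

instance (s : String) (queries : List (List Int)) : Decidable (Pre_canMakePaliQueries s queries) := by
  unfold Pre_canMakePaliQueries; infer_instance

def pvWitness_canMakePaliQueries : String × List (List Int) := ("ab", [[0, 1, 1]])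

def Spec_canMakePaliQueries (s : String) (queries : List (List Int)) (out : List Bool) : Prop := out = canMakePaliQueries_alt s queries
instance (s : String) (queries : List (List Int)) (out : List Bool) : Decidable (Spec_canMakePaliQueries s queries out) := by unfold Spec_canMakePaliQueries; infer_instance

-- ===== CLAIM (what is proved, stated in full; the proofs are below) =====
def Claim_equal_canMakePaliQueries : Prop := ∀ (s : String) (queries : List (List Int)), Dom_canMakePaliQueries s queries → Pre_canMakePaliQueries s queries → Spec_canMakePaliQueries s queries (canMakePaliQueries s queries)

-- ===== LEMMAS AND PROOFS =====

-- keys of an association list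
def pvKeys (d : List (Char × Int)) : List Char := d.map Prod.fst

-- well-formedness of a Counter: unique keys, strictly positive values
def pvGood (d : List (Char × Int)) : Prop := (pvKeys d).Nodup ∧ ∀ p ∈ d, 0 < p.2

-- proof-side model of dp[i]: the Counter of the first i characters
def pvDD (cs : List Char) : List (Char × Int) :=
  cs.foldl (fun d ch => pvCounterAdd d [(ch, 1)]) []

lemma pvCntGet_single (c k : Char) : pvCntGet [(c, 1)] k = if c = k then 1 else 0 := by
  simp [pvCntGet]

lemma pvCntGet_eq_zero (c : List (Char × Int)) (k : Char) (h : k ∉ pvKeys c) :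
    pvCntGet c k = 0 := by
  induction c with
  | nil => rfl
  | cons p t ih =>
    obtain ⟨k1, v1⟩ := p
    simp only [pvKeys, List.map_cons, List.mem_cons, not_or] at h
    have hp : ¬ k1 = k := fun he => h.1 he.symm
    simp only [pvCntGet, if_neg hp]
    exact ih (by simpa [pvKeys] using h.2)

lemma pvCntGet_append (a b : List (Char × Int)) (k : Char) :
    pvCntGet (a ++ b) k = if k ∈ pvKeys a then pvCntGet a k else pvCntGet b k := by
  induction a with
  | nil => simp [pvKeys]
  | cons p t ih =>
    obtain ⟨k1, v1⟩ := p
    rw [List.cons_append]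
    show (if k1 = k then v1 else pvCntGet (t ++ b) k)
        = if k ∈ pvKeys ((k1, v1) :: t) then pvCntGet ((k1, v1) :: t) k else pvCntGet b k
    by_cases hp : k1 = k
    · subst hp
      simp [pvKeys, pvCntGet]
    · have hp' : ¬ k = k1 := fun he => hp he.symm
      rw [if_neg hp, ih]
      by_cases hk : k ∈ pvKeys t
      · have hmem : k ∈ pvKeys ((k1, v1) :: t) := by
          simp only [pvKeys, List.map_cons, List.mem_cons]
          exact Or.inr (by simpa [pvKeys] using hk)
        rw [if_pos hk, if_pos hmem]
        show pvCntGet t k = if k1 = k then v1 else pvCntGet t k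
        rw [if_neg hp]
      · have hmem : k ∉ pvKeys ((k1, v1) :: t) := by
          simp only [pvKeys, List.map_cons, List.mem_cons, not_or]
          exact ⟨hp', by simpa [pvKeys] using hk⟩
        rw [if_neg hk, if_neg hmem]

lemma pvCntGet_map_snd (c : List (Char × Int)) (f : Char → Int → Int) (k : Char) :
    pvCntGet (c.map (fun p => (p.1, f p.1 p.2))) k
      = if k ∈ pvKeys c then f k (pvCntGet c k) else 0 := by
  induction c with
  | nil => simp [pvCntGet, pvKeys]
  | cons p t ih =>
    obtain ⟨k1, v1⟩ := p
    rw [List.map_cons]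
    show (if k1 = k then f k1 v1 else pvCntGet (t.map (fun p => (p.1, f p.1 p.2))) k)
        = if k ∈ pvKeys ((k1, v1) :: t) then f k (pvCntGet ((k1, v1) :: t) k) else 0
    by_cases hp : k1 = k
    · subst hp
      simp [pvKeys, pvCntGet]
    · have hp' : ¬ k = k1 := fun he => hp he.symm
      rw [if_neg hp, ih]
      by_cases hk : k ∈ pvKeys t
      · have hmem : k ∈ pvKeys ((k1, v1) :: t) := by
          simp only [pvKeys, List.map_cons, List.mem_cons]
          exact Or.inr (by simpa [pvKeys] using hk)
        rw [if_pos hk, if_pos hmem]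
        show f k (pvCntGet t k) = f k (if k1 = k then v1 else pvCntGet t k)
        rw [if_neg hp]
      · have hmem : k ∉ pvKeys ((k1, v1) :: t) := by
          simp only [pvKeys, List.map_cons, List.mem_cons, not_or]
          exact ⟨hp', by simpa [pvKeys] using hk⟩
        rw [if_neg hk, if_neg hmem]

lemma pvCntGet_mem (c : List (Char × Int)) (k : Char) (v : Int)
    (hn : (pvKeys c).Nodup) (hm : (k, v) ∈ c) : pvCntGet c k = v := by
  induction c with
  | nil => simp at hm
  | cons p t ih =>
    obtain ⟨k1, v1⟩ := p
    rw [pvKeys, List.map_cons, List.nodup_cons] at hn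
    rcases List.mem_cons.mp hm with hm1 | hm1
    · cases hm1
      simp [pvCntGet]
    · have hk : ¬ k1 = k := by
        intro he; subst he
        exact hn.1 (List.mem_map.mpr ⟨(k1, v), hm1, rfl⟩)
      simp only [pvCntGet, if_neg hk]
      exact ih hn.2 hm1

lemma pvMem_keys (d : List (Char × Int)) (k : Char) (hg : pvGood d) :
    k ∈ pvKeys d ↔ pvCntGet d k ≠ 0 := by
  constructor
  · intro h
    rcases List.mem_map.mp h with ⟨p, hp, hpk⟩
    have := pvCntGet_mem d k p.2 hg.1 (by rwa [show (k, p.2) = p by cases p; simp_all])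
    have hpos := hg.2 p hp
    omega
  · intro h
    by_contra hk
    exact h (pvCntGet_eq_zero d k hk)

lemma pvCounterAdd_single_eq (d : List (Char × Int)) (c : Char) (hpos : ∀ p ∈ d, 0 < p.2) :
    pvCounterAdd d [(c, 1)]
      = (d.map (fun p => (p.1, p.2 + if c = p.1 then 1 else 0)))
        ++ (if c ∈ pvKeys d then [] else [(c, 1)]) := by
  unfold pvCounterAdd
  congr 1
  · rw [List.filter_eq_self.mpr]
    · simp only [pvCntGet_single]
    · intro p hp
      rcases List.mem_map.mp hp with ⟨p0, hp0, hpe⟩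
      have := hpos p0 hp0
      subst hpe
      simp only [pvCntGet_single, decide_eq_true_eq]
      split <;> omega
  · by_cases hc : c ∈ pvKeys d <;>
      simp only [pvKeys] at hc <;> simp [pvKeys, hc]

lemma pvKeys_counterAdd_single (d : List (Char × Int)) (c : Char) (hpos : ∀ p ∈ d, 0 < p.2) :
    pvKeys (pvCounterAdd d [(c, 1)]) = pvKeys d ++ (if c ∈ pvKeys d then [] else [c]) := by
  rw [pvCounterAdd_single_eq d c hpos]
  simp only [pvKeys, List.map_append, List.map_map]
  congr 1
  all_goals first
    | exact List.map_congr_left (fun p _ => rfl)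
    | (split <;> simp)

lemma pvGood_counterAdd_single (d : List (Char × Int)) (c : Char) (hg : pvGood d) :
    pvGood (pvCounterAdd d [(c, 1)]) := by
  constructor
  · rw [pvKeys_counterAdd_single d c hg.2]
    by_cases hc : c ∈ pvKeys d
    · simpa [hc] using hg.1
    · rw [if_neg hc]
      exact List.Nodup.append hg.1 (List.nodup_singleton c)
        (by simp [List.disjoint_singleton]; exact hc)
  · intro p hp
    rw [pvCounterAdd_single_eq d c hg.2] at hp
    rcases List.mem_append.mp hp with hp | hp
    · rcases List.mem_map.mp hp with ⟨p0, hp0, hpe⟩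
      have := hg.2 p0 hp0
      subst hpe
      dsimp
      split <;> omega
    · by_cases hc : c ∈ pvKeys d
      · rw [if_pos hc] at hp
        exact absurd hp (List.not_mem_nil)
      · rw [if_neg hc] at hp
        have hpe : p = (c, 1) := List.mem_singleton.mp hp
        subst hpe
        norm_num

lemma pvCntGet_counterAdd_single (d : List (Char × Int)) (c : Char) (hg : pvGood d) (k : Char) :
    pvCntGet (pvCounterAdd d [(c, 1)]) k = pvCntGet d k + (if c = k then 1 else 0) := by
  rw [pvCounterAdd_single_eq d c hg.2, pvCntGet_append]
  have hkeys : pvKeys (d.map (fun p => (p.1, p.2 + if c = p.1 then 1 else 0))) = pvKeys d := by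
    simp only [pvKeys, List.map_map]
    exact List.map_congr_left (fun p _ => rfl)
  rw [hkeys, pvCntGet_map_snd d (fun a b => b + if c = a then 1 else 0) k]
  by_cases hk : k ∈ pvKeys d
  · simp [hk]
  · rw [if_neg hk, pvCntGet_eq_zero d k hk]
    by_cases hc : c ∈ pvKeys d
    · have hck : ¬ (c = k) := fun he => hk (he ▸ hc)
      simp [hc, hck, pvCntGet]
    · simp [hc, pvCntGet_single]

lemma pvDD_append (cs : List Char) (c : Char) :
    pvDD (cs ++ [c]) = pvCounterAdd (pvDD cs) [(c, 1)] := by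
  simp [pvDD, List.foldl_append]

lemma pvDD_spec (cs : List Char) :
    pvGood (pvDD cs) ∧ ∀ k, pvCntGet (pvDD cs) k = (cs.count k : Int) := by
  induction cs using List.reverseRecOn with
  | nil => exact ⟨⟨by simp [pvDD, pvKeys], by simp [pvDD]⟩, by simp [pvDD, pvCntGet]⟩
  | append_singleton t c ih =>
    rw [pvDD_append]
    refine ⟨pvGood_counterAdd_single _ c ih.1, ?_⟩
    intro k
    rw [pvCntGet_counterAdd_single _ c ih.1 k, ih.2 k, List.count_append]
    by_cases h : c = k
    · subst h
      simp
    · simp [h]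

lemma pvKeys_DD (cs : List Char) (k : Char) :
    k ∈ pvKeys (pvDD cs) ↔ 0 < cs.count k := by
  rw [pvMem_keys _ _ (pvDD_spec cs).1, (pvDD_spec cs).2 k]
  omega

-- ---------- B-side: the odd-toggle set ----------

lemma pvScanOdd_append (t : List Char) (c : Char) :
    pvScanOdd (t ++ [c])
      = if PySem.Set.contains (pvScanOdd t) c
          then PySem.Set.discard (pvScanOdd t) c else PySem.Set.add (pvScanOdd t) c := by
  simp [pvScanOdd, List.foldl_append]

-- after scanning sub, the set is nodup and holds exactly the letters of odd count in sub
lemma pvScanOdd_spec (sub : List Char) :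
    (pvScanOdd sub).Nodup ∧ ∀ k, (k ∈ pvScanOdd sub ↔ sub.count k % 2 = 1) := by
  induction sub using List.reverseRecOn with
  | nil => exact ⟨List.nodup_nil, by simp [pvScanOdd, PySem.Set.empty]⟩
  | append_singleton t c ih =>
    have hcnt : ∀ k : Char, (t ++ [c]).count k = t.count k + (if k = c then 1 else 0) := by
      intro k
      rw [List.count_append]
      by_cases hk : k = c
      · subst hk; simp
      · rw [if_neg hk, show List.count k [c] = 0 from List.count_eq_zero.mpr (by simp [hk])]
    rw [pvScanOdd_append]
    by_cases hc : c ∈ pvScanOdd t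
    · rw [if_pos ((PySem.Set.contains_iff _ _).mpr hc)]
      refine ⟨PySem.Set.nodup_discard _ _ ih.1, ?_⟩
      intro k
      rw [PySem.Set.mem_discard, ih.2 k, hcnt k]
      have hodd := (ih.2 c).mp hc
      by_cases hk : k = c
      · subst hk
        rw [if_pos rfl]
        constructor
        · rintro ⟨_, hne⟩; exact absurd rfl hne
        · intro h; exfalso; omega
      · rw [if_neg hk]
        simp [hk]
    · rw [if_neg (by simpa [PySem.Set.contains_iff] using hc)]
      refine ⟨PySem.Set.nodup_add _ _ ih.1, ?_⟩
      intro k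
      rw [PySem.Set.mem_add, ih.2 k, hcnt k]
      have heven : t.count c % 2 ≠ 1 := fun h => hc ((ih.2 c).mpr h)
      by_cases hk : k = c
      · subst hk
        rw [if_pos rfl]
        constructor
        · intro _; omega
        · intro _; exact Or.inr rfl
      · rw [if_neg hk]
        simp [hk]

-- ---------- structure of dp ----------

lemma pvDp_eq (s : String) :
    (PySem.List.pyRange 1 (PySem.Str.len s + 1) 1).foldl
      (fun dp i => dp ++ [pvCounterAdd ((PySem.List.pyGet? dp (i-1)).getD [])
                           [(((PySem.Str.pyGet? s (i-1)).getD ' '), 1)]]) [[]]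
    = (List.range (s.toList.length + 1)).map (fun i => pvDD (s.toList.take i)) := by
  have key : ∀ k : Nat, k ≤ s.toList.length →
      (PySem.List.pyRange 1 ((k : Int) + 1) 1).foldl
        (fun dp i => dp ++ [pvCounterAdd ((PySem.List.pyGet? dp (i-1)).getD [])
                             [(((PySem.Str.pyGet? s (i-1)).getD ' '), 1)]]) [[]]
      = (List.range (k + 1)).map (fun i => pvDD (s.toList.take i)) := by
    intro k
    induction k with
    | zero => intro _; simp [PySem.List.pyRange_one_eq_nil, pvDD]
    | succ k ih =>
      intro hk
      have h1 : ((k + 1 : Nat) : Int) + 1 = ((k : Int) + 1) + 1 := by omega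
      rw [h1, PySem.List.pyRange_one_succ_right (by omega), List.foldl_append]
      rw [ih (by omega)]
      simp only [List.foldl_cons, List.foldl_nil]
      have h2 : ((k : Int) + 1) - 1 = ((k : Nat) : Int) := by omega
      rw [h2, PySem.List.pyGet?_natCast]
      rw [PySem.Str.pyGet?_natCast]
      have hklt : k < s.toList.length := by omega
      have h3 : ((List.range (k + 1)).map (fun i => pvDD (s.toList.take i)))[k]? =
          some (pvDD (s.toList.take k)) := by
        simp
      rw [h3]
      have h4 : s.toList[k]? = some (s.toList[k]) := List.getElem?_eq_getElem hklt
      rw [h4]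
      simp only [Option.getD_some]
      rw [← pvDD_append, ← List.take_succ_eq_append_getElem hklt]
      rw [List.range_succ, List.map_append]
      simp [List.range_succ]
  have hlen : PySem.Str.len s = (s.toList.length : Int) := by
    simp [PySem.Str.len_eq]
  rw [hlen]
  exact key s.toList.length le_rfl

-- ---------- indexing a mapped range with a nonnegative Python index ----------

lemma pvPyGet_map_range {α : Type} (f : Nat → α) (n : Nat) (i : Int)
    (h1 : 0 ≤ i) (h2 : i ≤ (n : Int)) :
    PySem.List.pyGet? ((List.range (n + 1)).map f) i = some (f i.toNat) := by
  rw [PySem.List.pyGet?_of_nonneg _ h1]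
  rw [List.getElem?_map, List.getElem?_range (by omega)]
  simp only [Option.map_some]

-- ---------- per-query arithmetic ----------

lemma pvSum_filter_eq (l : List (Char × Int)) (pr : Char × Int → Bool) (g : Int → Int)
    (h0 : ∀ p ∈ l, pr p = false → g p.2 = 0) :
    (((l.filter pr).map Prod.snd).map g).sum = ((l.map Prod.snd).map g).sum := by
  induction l with
  | nil => rfl
  | cons p t ih =>
    have ih' := ih (fun x hx => h0 x (List.mem_cons_of_mem p hx))
    by_cases hp : pr p = true
    · rw [List.filter_cons_of_pos hp]
      simp only [List.map_cons, List.sum_cons]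
      rw [ih']
    · have hp' : pr p = false := by simpa using hp
      rw [List.filter_cons_of_neg (by simp [hp'])]
      simp only [List.map_cons, List.sum_cons]
      rw [ih', h0 p List.mem_cons_self hp']
      ring

lemma pvSum_mod2_countP (l : List (Char × Int)) (u : Char → Nat) :
    (l.map (fun p => u p.1 % 2)).sum = l.countP (fun p => decide (u p.1 % 2 = 1)) := by
  induction l with
  | nil => rfl
  | cons p t ih =>
    simp only [List.map_cons, List.sum_cons, List.countP_cons, ih]
    by_cases h : u p.1 % 2 = 1 <;> simp [h] <;> omega

-- the central per-query identity: A's parity sum over the Counter difference of prefixes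
-- equals B's size of the odd-toggle set of the slice
lemma pvCore (cs : List Char) (l' r' : Nat) :
    ((pvCounterSub (pvDD (cs.take r')) (pvDD (cs.take l'))).map Prod.snd).foldl
        (fun a v => a + PySem.Int.mod v 2) 0
    = PySem.Set.len (pvScanOdd ((cs.drop l').take (r' - l'))) := by
  have hgR := (pvDD_spec (cs.take r')).1
  have hgL := (pvDD_spec (cs.take l')).1
  have hvR := (pvDD_spec (cs.take r')).2
  have hvL := (pvDD_spec (cs.take l')).2
  -- the second half of Counter.__sub__ is always empty: dp values are positive
  have hpart2 : ((pvDD (cs.take l')).filter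
      (fun p => decide (p.1 ∉ (pvDD (cs.take r')).map Prod.fst) && decide (p.2 < 0))) = [] := by
    apply List.filter_eq_nil_iff.mpr
    intro p hp
    have := hgL.2 p hp
    simp; omega
  have hlenS : PySem.Set.len (pvScanOdd ((cs.drop l').take (r' - l')))
      = ((pvScanOdd ((cs.drop l').take (r' - l'))).length : Int) := rfl
  by_cases hlr : l' ≤ r'
  · -- the slice is exactly the middle segment of cs.take r'
    set sub := (cs.drop l').take (r' - l') with hsub
    have hsplit : cs.take r' = cs.take l' ++ sub := by
      rw [hsub, ← List.take_add, Nat.add_sub_cancel' hlr]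
    have hcount : ∀ k, (cs.take r').count k = (cs.take l').count k + sub.count k := by
      intro k; rw [hsplit, List.count_append]
    have hmono : ∀ k, (cs.take l').count k ≤ (cs.take r').count k := by
      intro k; rw [hcount k]; omega
    -- A's foldl is the sum of parities (count_r - count_l) % 2 = count_sub % 2 over dp r''s keys
    have hA : ((pvCounterSub (pvDD (cs.take r')) (pvDD (cs.take l'))).map Prod.snd).foldl
          (fun a v => a + PySem.Int.mod v 2) 0
        = ((((pvDD (cs.take r')).map (fun p => (sub.count p.1 % 2 : Nat))).sum : Nat) : Int) := by
      rw [PySem.List.foldl_add]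
      rw [show pvCounterSub (pvDD (cs.take r')) (pvDD (cs.take l'))
          = ((pvDD (cs.take r')).map (fun p => (p.1, p.2 - pvCntGet (pvDD (cs.take l')) p.1))).filter
              (fun p => decide (0 < p.2)) from by
        unfold pvCounterSub; rw [hpart2]; simp]
      rw [pvSum_filter_eq _ _ _ (by
        intro p hp hfalse
        rcases List.mem_map.mp hp with ⟨p0, hp0, hpe⟩
        subst hpe
        simp only [decide_eq_false_iff_not, not_lt] at hfalse
        have h1 : p0.2 = ((cs.take r').count p0.1 : Int) := by
          rw [← hvR p0.1]
          exact (pvCntGet_mem _ _ _ hgR.1 (by simpa using hp0)).symm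
        have h2 : pvCntGet (pvDD (cs.take l')) p0.1 = ((cs.take l').count p0.1 : Int) := hvL p0.1
        dsimp at hfalse ⊢
        rw [h1, h2] at hfalse ⊢
        have := hmono p0.1
        have hz : ((cs.take r').count p0.1 : Int) - ((cs.take l').count p0.1 : Int) = 0 := by omega
        rw [hz]
        rfl)]
      rw [List.map_map, List.map_map]
      have : ∀ p ∈ pvDD (cs.take r'),
          (((fun v => PySem.Int.mod v 2) ∘ Prod.snd) ∘ (fun p => (p.1, p.2 - pvCntGet (pvDD (cs.take l')) p.1))) p
          = ((fun p => ((sub.count p.1 % 2 : Nat) : Int))) p := by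
        intro p hp
        have h1 : p.2 = ((cs.take r').count p.1 : Int) := by
          rw [← hvR p.1]
          exact (pvCntGet_mem _ _ _ hgR.1 (by simpa using hp)).symm
        simp only [Function.comp]
        rw [h1, hvL p.1]
        rw [PySem.Int.mod_eq_emod_of_pos (by norm_num : (0:Int) < 2)]
        have := hcount p.1
        omega
      rw [List.map_congr_left this]
      rw [show ((pvDD (cs.take r')).map (fun p => ((sub.count p.1 % 2 : Nat) : Int)))
          = (((pvDD (cs.take r')).map (fun p => (sub.count p.1 % 2 : Nat))).map (fun m : Nat => (m : Int))) from by
        rw [List.map_map]; rfl]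
      rw [← Nat.cast_list_sum]
      exact zero_add _
    rw [hA, hlenS]
    -- both sides count the same nodup collection of letters of odd count in sub
    congr 1
    rw [pvSum_mod2_countP (pvDD (cs.take r')) (fun k => sub.count k)]
    rw [show (pvDD (cs.take r')).countP (fun p => decide (sub.count p.1 % 2 = 1))
        = (pvKeys (pvDD (cs.take r'))).countP (fun k => decide (sub.count k % 2 = 1)) from by
      rw [pvKeys, List.countP_map]; rfl]
    rw [List.countP_eq_length_filter]
    apply List.Perm.length_eq
    apply (List.perm_ext_iff_of_nodup (hgR.1.filter _) (pvScanOdd_spec sub).1).mpr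
    intro k
    rw [List.mem_filter, (pvScanOdd_spec sub).2 k]
    simp only [decide_eq_true_eq]
    constructor
    · rintro ⟨_, h⟩; exact h
    · intro h
      refine ⟨?_, h⟩
      rw [pvKeys_DD, hcount k]
      omega
  · -- reversed range: the Counter difference is empty and the slice is empty
    have hmono : ∀ k, (cs.take r').count k ≤ (cs.take l').count k := by
      intro k
      have hsub : List.Sublist (cs.take r') (cs.take l') := by
        have := List.take_sublist r' (cs.take l')
        rwa [List.take_take, Nat.min_eq_left (by omega)] at this
      exact hsub.count_le k
    have hpart1 : (((pvDD (cs.take r')).map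
        (fun p => (p.1, p.2 - pvCntGet (pvDD (cs.take l')) p.1))).filter
          (fun p => decide (0 < p.2))) = [] := by
      apply List.filter_eq_nil_iff.mpr
      intro p hp
      rcases List.mem_map.mp hp with ⟨p0, hp0, hpe⟩
      subst hpe
      have h1 : p0.2 = ((cs.take r').count p0.1 : Int) := by
        rw [← hvR p0.1]
        exact (pvCntGet_mem _ _ _ hgR.1 (by simpa using hp0)).symm
      have h2 : pvCntGet (pvDD (cs.take l')) p0.1 = ((cs.take l').count p0.1 : Int) := hvL p0.1
      have := hmono p0.1
      simp only [decide_eq_true_eq, not_lt]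
      show p0.2 - pvCntGet (pvDD (List.take l' cs)) p0.1 ≤ 0
      rw [h1, h2]
      omega
    have hempty : (r' - l' : Nat) = 0 := by omega
    rw [show pvCounterSub (pvDD (cs.take r')) (pvDD (cs.take l')) = [] from by
      unfold pvCounterSub; rw [hpart1, hpart2]; rfl]
    rw [hempty]
    simp [pvScanOdd, PySem.Set.len, PySem.Set.empty]

-- ---------- main assembly ----------

theorem canMakePaliQueries_spec : Claim_equal_canMakePaliQueries := by
  unfold Claim_equal_canMakePaliQueries
  intro s queries _hDom hPre
  unfold Spec_canMakePaliQueries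
  unfold canMakePaliQueries canMakePaliQueries_alt
  simp only [pvDp_eq s]
  rw [PySem.List.foldl_append_singleton_eq_map, PySem.List.foldl_append_singleton_eq_map]
  simp only [List.nil_append]
  apply List.map_congr_left
  intro qr hqr
  have hq : pvPreQ (s.toList.length : Int) qr = true :=
    List.all_eq_true.mp hPre qr hqr
  set n := s.toList.length with hn
  match qr with
  | [] => simp [pvPreQ] at hq
  | [_] => simp [pvPreQ] at hq
  | [_, _] => simp [pvPreQ] at hq
  | (_ :: _ :: _ :: _ :: _) => simp [pvPreQ] at hq
  | [l, r, q] =>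
    simp only [pvPreQ, decide_eq_true_eq] at hq
    obtain ⟨hb1, hb2, hb3, hb4⟩ := hq
    rw [show pvAnswerA ((List.range (n + 1)).map (fun i => pvDD (s.toList.take i))) [l, r, q]
        = decide (PySem.Int.floordiv
            (((pvCounterSub (pvDD (s.toList.take (r+1).toNat)) (pvDD (s.toList.take l.toNat))).map
                Prod.snd).foldl (fun a v => a + PySem.Int.mod v 2) 0) 2 ≤ q) from by
      simp only [pvAnswerA]
      rw [pvPyGet_map_range _ n (r+1) (by omega) (by omega),
          pvPyGet_map_range _ n l (by omega) (by omega)]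
      rfl]
    rw [show pvAnswerB s.toList [l, r, q]
        = decide (PySem.Int.floordiv
            (PySem.Set.len (pvScanOdd ((s.toList.drop l.toNat).take ((r+1).toNat - l.toNat)))) 2 ≤ q) from by
      simp only [pvAnswerB]
      rw [PySem.List.slice_toNat _ (by omega) (by omega)]]
    rw [pvCore s.toList l.toNat (r+1).toNat]
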